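-- pv_equiv track=rewrite | github.com/simonowen/tile2sam | tile2sam.py | image_data_bytes
-- ===== SOURCE A (Python) =====
-- def group_split(items, group_size):
--     """Split a list into groups of a given size"""
--     it = iter(items)
--     return list(zip(*[it] * group_size))
--
-- def image_data_bytes(img_data, bpp=4):
--     """Convert CLUT entries to SAM display byte rows"""
--     byte_groups = group_split(img_data, 8 // bpp)
--     data_bytes = [sum([n << (bpp * i)
--                     for i,n in enumerate(reversed(t))]) for t in byte_groups]
--
--     mask_value = (1 << bpp) - 1
--     mask_bytes = [sum([(mask_value if n else 0) << (bpp * i)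
--                     for i,n in enumerate(reversed(t))]) for t in byte_groups]
--
--     return data_bytes, mask_bytes
-- ===== SOURCE B (Python) =====
-- def image_data_bytes(img_data, bpp=4):
--     """Convert CLUT entries to SAM display byte rows (single fused pass)"""
--     group_size = 8 // bpp
--     mask_value = (1 << bpp) - 1
--     data_bytes, mask_bytes = [], []
--     if group_size > 0:
--         count = acc_data = acc_mask = 0
--         for n in img_data:
--             acc_data = (acc_data << bpp) + n
--             acc_mask = (acc_mask << bpp) + (mask_value if n else 0)
--             count += 1
--             if count == group_size:
--                 data_bytes.append(acc_data)
--                 mask_bytes.append(acc_mask)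
--                 count = acc_data = acc_mask = 0
--     return data_bytes, mask_bytes
-- ===== Notes on version B (the rewrite author's own statement) =====
-- stated objective: alternative
-- what changed: Replaced group_split (zip-chunking) plus two separate sum-over-enumerate(reversed) comprehensions by one fused pass over the pixels keeping a counter and two Horner accumulators (acc = (acc << bpp) + value), appending both bytes whenever a group completes and dropping any trailing partial group.
import Mathlib
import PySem

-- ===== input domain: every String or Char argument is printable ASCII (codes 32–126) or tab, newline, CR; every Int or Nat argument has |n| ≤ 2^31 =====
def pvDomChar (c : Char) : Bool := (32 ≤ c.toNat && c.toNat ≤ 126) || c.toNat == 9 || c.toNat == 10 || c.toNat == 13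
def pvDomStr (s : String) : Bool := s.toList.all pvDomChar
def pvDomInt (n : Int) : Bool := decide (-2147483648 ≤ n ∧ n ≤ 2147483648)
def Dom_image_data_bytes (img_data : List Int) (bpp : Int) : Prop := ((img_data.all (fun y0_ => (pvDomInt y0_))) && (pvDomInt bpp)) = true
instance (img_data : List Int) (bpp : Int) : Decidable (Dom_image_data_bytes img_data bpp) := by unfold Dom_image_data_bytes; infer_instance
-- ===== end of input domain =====

-- B replaces group_split plus two sum-comprehensions with one fused pass keeping two Horner
-- accumulators and a pixel counter (objective: alternative decomposition, same O(n) cost).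

-- ===== PORT A =====
-- group_split's zip(*[it]*g) yields the consecutive g-chunks, dropping a trailing incomplete
-- chunk, and yields [] when g ≤ 0 (zip of no iterables); pvChunksA is exactly that.
def pvChunksA (xs : List Int) (g : Nat) : List (List Int) :=
  if h : g = 0 ∨ xs.length < g then [] else xs.take g :: pvChunksA (xs.drop g) g
termination_by xs.length
decreasing_by
  simp only [List.length_drop]; omega

def pvGroupSplit (items : List Int) (group_size : Int) : List (List Int) :=
  pvChunksA items group_size.toNat

-- n << (bpp*i): in every executed case bpp > 0 and i ≥ 0, where (bpp*i).toNat is exact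
def pvDataByte (bpp : Int) (t : List Int) : Int :=
  ((PySem.List.enumerate t.reverse 0).map (fun p => p.2 * 2 ^ (bpp * p.1).toNat)).sum

def pvMaskByte (bpp mask_value : Int) (t : List Int) : Int :=
  ((PySem.List.enumerate t.reverse 0).map
    (fun p => (if p.2 ≠ 0 then mask_value else 0) * 2 ^ (bpp * p.1).toNat)).sum

def image_data_bytes (img_data : List Int) (bpp : Int) : List Int × List Int :=
  let byte_groups := pvGroupSplit img_data (PySem.Int.floordiv 8 bpp)
  let data_bytes := byte_groups.map (fun t => pvDataByte bpp t)
  let mask_value := 2 ^ bpp.toNat - 1     -- (1 << bpp) - 1; exact for bpp ≥ 0 (bpp < 0 raises, outside Pre_)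
  let mask_bytes := byte_groups.map (fun t => pvMaskByte bpp mask_value t)
  (data_bytes, mask_bytes)

-- ===== PORT B =====
-- (acc << bpp) + n is ported as acc * 2^bpp + n (exact for bpp ≥ 0; bpp < 0 raises, outside Pre_)
def image_data_bytes_alt (img_data : List Int) (bpp : Int) : List Int × List Int :=
  let group_size := PySem.Int.floordiv 8 bpp
  let mask_value := 2 ^ bpp.toNat - 1
  if group_size > 0 then
    let st := img_data.foldl
      (fun (st : Int × Int × Int × List Int × List Int) n =>
        let (count, acc_data, acc_mask, data_bytes, mask_bytes) := st
        let acc_data := acc_data * 2 ^ bpp.toNat + n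
        let acc_mask := acc_mask * 2 ^ bpp.toNat + (if n ≠ 0 then mask_value else 0)
        let count := count + 1
        if count = group_size then
          (0, 0, 0, data_bytes ++ [acc_data], mask_bytes ++ [acc_mask])
        else
          (count, acc_data, acc_mask, data_bytes, mask_bytes))
      (0, 0, 0, ([] : List Int), ([] : List Int))
    (st.2.2.2.1, st.2.2.2.2)
  else ([], [])

-- ===== PRECONDITION & SPEC =====
-- A raises for bpp ≤ 0 (ZeroDivisionError at 8//0, ValueError from 1 << bpp for bpp < 0)
def Pre_image_data_bytes (img_data : List Int) (bpp : Int) : Prop := 0 < bpp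
instance (img_data : List Int) (bpp : Int) : Decidable (Pre_image_data_bytes img_data bpp) := by
  unfold Pre_image_data_bytes; infer_instance

def pvWitness_image_data_bytes : List Int × Int := ([1, 0, 2, 15, 7], 4)

def Spec_image_data_bytes (img_data : List Int) (bpp : Int) (out : List Int × List Int) : Prop := out = image_data_bytes_alt img_data bpp
instance (img_data : List Int) (bpp : Int) (out : List Int × List Int) : Decidable (Spec_image_data_bytes img_data bpp out) := by unfold Spec_image_data_bytes; infer_instance

-- ===== CLAIM (what is proved, stated in full; the proofs are below) =====
def Claim_equal_image_data_bytes : Prop := ∀ (img_data : List Int) (bpp : Int), Dom_image_data_bytes img_data bpp → Pre_image_data_bytes img_data bpp → Spec_image_data_bytes img_data bpp (image_data_bytes img_data bpp)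

-- ===== LEMMAS AND PROOFS =====

-- B's loop body, abstracted over the byte width Bv = 2^bpp, the mask value and the group size
def pvStep (Bv mv gI : Int) (st : Int × Int × Int × List Int × List Int) (n : Int) :
    Int × Int × Int × List Int × List Int :=
  let (count, acc_data, acc_mask, data_bytes, mask_bytes) := st
  let acc_data := acc_data * Bv + n
  let acc_mask := acc_mask * Bv + (if n ≠ 0 then mv else 0)
  let count := count + 1
  if count = gI then
    (0, 0, 0, data_bytes ++ [acc_data], mask_bytes ++ [acc_mask])
  else
    (count, acc_data, acc_mask, data_bytes, mask_bytes)

-- Horner accumulators over one chunk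
def pvHD (Bv : Int) (a : Int) (t : List Int) : Int :=
  t.foldl (fun x n => x * Bv + n) a
def pvHM (Bv mv : Int) (a : Int) (t : List Int) : Int :=
  t.foldl (fun x n => x * Bv + (if n ≠ 0 then mv else 0)) a

lemma pvChunksA_nil (g : Nat) (xs : List Int) (h : g = 0 ∨ xs.length < g) :
    pvChunksA xs g = [] := by
  rw [pvChunksA]; simp [h]

lemma pvChunksA_cons (g : Nat) (xs : List Int) (h0 : g ≠ 0) (h1 : g ≤ xs.length) :
    pvChunksA xs g = xs.take g :: pvChunksA (xs.drop g) g := by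
  rw [pvChunksA, dif_neg (by omega : ¬(g = 0 ∨ xs.length < g))]

-- horner scaling: fold from a = a·Bv^len + fold from 0, for any coefficient map
lemma pvHorner_acc (Bv : Int) (f : Int → Int) :
    ∀ (t : List Int) (a : Int),
      t.foldl (fun x n => x * Bv + f n) a = a * Bv ^ t.length + t.foldl (fun x n => x * Bv + f n) 0 := by
  intro t
  induction t with
  | nil => intro a; simp
  | cons n t ih =>
    intro a
    simp only [List.foldl_cons, List.length_cons]
    rw [ih (a * Bv + f n), ih (0 * Bv + f n)]
    ring

-- A's reversed-enumerate sum over a chunk is the Horner value, for any coefficient map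
lemma pvSumRev_eq_horner (bpp : Int) (hb : 0 < bpp) (f : Int → Int) :
    ∀ (t : List Int),
      ((PySem.List.enumerate t.reverse 0).map (fun p => f p.2 * 2 ^ (bpp * p.1).toNat)).sum
        = t.foldl (fun x n => x * 2 ^ bpp.toNat + f n) 0 := by
  intro t
  induction t with
  | nil => simp [PySem.List.enumerate_nil]
  | cons n t ih =>
    have hidx : (bpp * (0 + (t.length : Int))).toNat = bpp.toNat * t.length := by
      rw [zero_add]
      have hnn : (0 : Int) ≤ bpp * (t.length : Int) := mul_nonneg hb.le (by positivity)
      have h1 : (((bpp * (t.length : Int)).toNat : Int)) = bpp * (t.length : Int) :=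
        Int.toNat_of_nonneg hnn
      have h2 : (((bpp.toNat * t.length : Nat) : Int)) = bpp * (t.length : Int) := by
        push_cast [Int.toNat_of_nonneg hb.le]
        ring
      exact Nat.cast_inj.mp (h1.trans h2.symm)
    rw [List.foldl_cons]
    rw [pvHorner_acc (2 ^ bpp.toNat) f t (0 * 2 ^ bpp.toNat + f n)]
    simp only [List.reverse_cons, PySem.List.enumerate_append, List.map_append, List.sum_append,
      PySem.List.enumerate_cons, PySem.List.enumerate_nil, List.length_reverse]
    rw [ih]
    simp only [List.map_cons, List.map_nil, List.sum_cons, List.sum_nil, hidx, pow_mul]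
    ring

-- a partial (short) run of the loop: never completes a group
lemma pvFold_partial (Bv mv gI : Int) :
    ∀ (xs : List Int) (c ad am : Int) (ds ms : List Int),
      c + xs.length < gI →
      xs.foldl (pvStep Bv mv gI) (c, ad, am, ds, ms)
        = (c + xs.length, pvHD Bv ad xs, pvHM Bv mv am xs, ds, ms) := by
  intro xs
  induction xs with
  | nil => intro c ad am ds ms _; simp [pvHD, pvHM]
  | cons n xs ih =>
    intro c ad am ds ms hlt
    simp only [List.length_cons] at hlt
    have hne : c + 1 ≠ gI := by push_cast at hlt ⊢; omega
    simp only [List.foldl_cons, pvStep, if_neg hne]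
    rw [ih (c + 1) _ _ ds ms (by push_cast at hlt ⊢; omega)]
    simp only [pvHD, pvHM, List.length_cons, List.foldl_cons]
    congr 1
    push_cast
    ring

-- a run over exactly one full group: appends both Horner values and resets the state
lemma pvFold_chunk (Bv mv gI : Int) :
    ∀ (xs : List Int) (c ad am : Int) (ds ms : List Int),
      c < gI → c + xs.length = gI →
      xs.foldl (pvStep Bv mv gI) (c, ad, am, ds, ms)
        = (0, 0, 0, ds ++ [pvHD Bv ad xs], ms ++ [pvHM Bv mv am xs]) := by
  intro xs
  induction xs with
  | nil => intro c ad am ds ms hlt heq; simp at hlt heq; omega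
  | cons n xs ih =>
    intro c ad am ds ms hlt heq
    simp only [List.length_cons] at heq
    by_cases h : c + 1 = gI
    · have hx : xs = [] := by
        have : (xs.length : Int) = 0 := by push_cast at heq ⊢; omega
        simpa using this
      subst hx
      simp [pvStep, h, pvHD, pvHM]
    · simp only [List.foldl_cons, pvStep, if_neg h]
      rw [ih (c + 1) _ _ ds ms (by omega) (by push_cast at heq ⊢; omega)]
      simp [pvHD, pvHM]

-- the whole loop: the two output lists are the old lists plus the per-chunk Horner values
lemma pvFold_out (Bv mv : Int) (g : Nat) (hg : 0 < g) :
    ∀ (N : Nat) (xs : List Int), xs.length ≤ N → ∀ (ds ms : List Int),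
      ((xs.foldl (pvStep Bv mv (g : Int)) (0, 0, 0, ds, ms)).2.2.2.1,
       (xs.foldl (pvStep Bv mv (g : Int)) (0, 0, 0, ds, ms)).2.2.2.2)
        = (ds ++ (pvChunksA xs g).map (pvHD Bv 0),
           ms ++ (pvChunksA xs g).map (pvHM Bv mv 0)) := by
  intro N
  induction N with
  | zero =>
    intro xs hlen ds ms
    have hx : xs = [] := by simpa using List.length_eq_zero_iff.mp (Nat.le_zero.mp hlen)
    subst hx
    simp [pvChunksA_nil g [] (Or.inr (by simpa using hg))]
  | succ N ih =>
    intro xs hlen ds ms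
    by_cases hlt : xs.length < g
    · rw [pvFold_partial Bv mv (g : Int) xs 0 0 0 ds ms (by push_cast; omega)]
      rw [pvChunksA_nil g xs (Or.inr hlt)]
      simp
    · have hge : g ≤ xs.length := by omega
      have hsplit : xs = xs.take g ++ xs.drop g := (List.take_append_drop g xs).symm
      conv_lhs => rw [hsplit]
      rw [List.foldl_append]
      rw [pvFold_chunk Bv mv (g : Int) (xs.take g) 0 0 0 ds ms (by push_cast; omega)
        (by simp [List.length_take, Nat.min_eq_left hge])]
      rw [ih (xs.drop g) (by simp [List.length_drop]; omega)]
      rw [pvChunksA_cons g xs (by omega) hge]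
      simp

theorem pv_main (img_data : List Int) (bpp : Int) (hb : 0 < bpp) :
    image_data_bytes img_data bpp = image_data_bytes_alt img_data bpp := by
  have hdata : ∀ t : List Int, pvDataByte bpp t = pvHD (2 ^ bpp.toNat) 0 t := by
    intro t
    simpa [pvDataByte, pvHD] using pvSumRev_eq_horner bpp hb (fun n => n) t
  have hmask : ∀ t : List Int, pvMaskByte bpp (2 ^ bpp.toNat - 1) t
      = pvHM (2 ^ bpp.toNat) (2 ^ bpp.toNat - 1) 0 t := by
    intro t
    simpa [pvMaskByte, pvHM] using
      pvSumRev_eq_horner bpp hb (fun n => if n ≠ 0 then 2 ^ bpp.toNat - 1 else 0) t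
  set gI : Int := PySem.Int.floordiv 8 bpp with hgI
  have hg0 : 0 ≤ gI := by
    rw [hgI, PySem.Int.floordiv_eq_ediv_of_pos hb]
    exact Int.ediv_nonneg (by norm_num) hb.le
  by_cases hpos : 0 < gI
  · have hcast : ((gI.toNat : Int)) = gI := Int.toNat_of_nonneg hg0
    have hgN : 0 < gI.toNat := by omega
    have hstep : (fun (st : Int × Int × Int × List Int × List Int) n =>
        let (count, acc_data, acc_mask, data_bytes, mask_bytes) := st
        let acc_data := acc_data * 2 ^ bpp.toNat + n
        let acc_mask := acc_mask * 2 ^ bpp.toNat + (if n ≠ 0 then 2 ^ bpp.toNat - 1 else 0)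
        let count := count + 1
        if count = gI then
          (0, 0, 0, data_bytes ++ [acc_data], mask_bytes ++ [acc_mask])
        else
          (count, acc_data, acc_mask, data_bytes, mask_bytes))
        = pvStep (2 ^ bpp.toNat) (2 ^ bpp.toNat - 1) gI := rfl
    have hout := pvFold_out (2 ^ bpp.toNat) (2 ^ bpp.toNat - 1) gI.toNat hgN
      img_data.length img_data le_rfl [] []
    rw [hcast] at hout
    simp only [List.nil_append] at hout
    simp only [image_data_bytes, image_data_bytes_alt, ← hgI, if_pos hpos, hstep]
    rw [Prod.mk_inj] at hout
    rw [hout.1, hout.2]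
    simp only [pvGroupSplit, Prod.mk_inj]
    constructor
    · exact List.map_congr_left (fun t _ => hdata t)
    · exact List.map_congr_left (fun t _ => hmask t)
  · have hz : gI.toNat = 0 := by omega
    simp only [image_data_bytes, image_data_bytes_alt, ← hgI, if_neg hpos, pvGroupSplit, hz]
    rw [pvChunksA_nil 0 img_data (Or.inl rfl)]
    simp

-- ===== VERDICT (by name: the statement is the Claim_ definition above) =====
theorem image_data_bytes_spec : Claim_equal_image_data_bytes := by
  intro img_data bpp _ hpre
  unfold Spec_image_data_bytes
  exact pv_main img_data bpp hpre
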